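-- pv_equiv track=rewrite | github.com/Leapense/problems | 31458번: !!초콜릿 중독 주의!!/!!초콜릿 중독 주의!!.py | calculate_expression
-- ===== SOURCE A (Python) =====
-- def calculate_expression(expression):
--     # n의 위치를 찾는다
--     n_index = 0
--     while expression[n_index] == '!':
--         n_index += 1
--
--     # n은 expression[n_index] 위치에 있다
--     n = int(expression[n_index])
--
--     # 앞쪽에 붙은 !의 개수 (논리 반전)
--     left_bang_count = n_index
--
--     # 뒤쪽에 붙은 !의 개수 (팩토리얼)
--     right_bang_count = len(expression) - n_index - 1
--
--     # 팩토리얼 적용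
--     for _ in range(right_bang_count):
--         n = 1  # 0! = 1, 1! = 1
--
--     # 논리 반전 적용
--     for _ in range(left_bang_count):
--         n = 1 - n  # !0 = 1, !1 = 0
--
--     return n
-- ===== SOURCE B (Python) =====
-- def calculate_expression(expression):
--     stripped = expression.lstrip('!')
--     left = len(expression) - len(stripped)
--     n = int(stripped[0])
--     if len(stripped) > 1:
--         n = 1  # any trailing '!' makes the factorial value 1
--     return 1 - n if left % 2 == 1 else n
-- ===== Notes on version B (the rewrite author's own statement) =====
-- stated objective: simpler
-- what changed: Replaces the index-scanning while loop and both counting for-loops with a closed form: lstrip('!') splits off the leading bangs, any trailing characters force n = 1, and the logical negations collapse to a single parity test left % 2.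
-- outside the precondition, e.g. on calculate_expression('!'): A raises IndexError, B raises IndexError; on calculate_expression('!a2'): A raises ValueError, B raises ValueError
import Mathlib
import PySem

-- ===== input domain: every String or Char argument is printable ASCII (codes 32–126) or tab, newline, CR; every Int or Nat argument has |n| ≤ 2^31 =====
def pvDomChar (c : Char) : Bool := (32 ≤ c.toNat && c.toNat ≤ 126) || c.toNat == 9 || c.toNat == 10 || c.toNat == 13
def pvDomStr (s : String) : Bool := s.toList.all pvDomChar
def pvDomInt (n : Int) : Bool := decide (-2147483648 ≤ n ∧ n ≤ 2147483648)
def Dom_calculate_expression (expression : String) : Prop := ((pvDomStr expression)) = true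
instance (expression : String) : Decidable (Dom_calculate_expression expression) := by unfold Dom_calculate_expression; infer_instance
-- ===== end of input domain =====

-- B replaces A's scanning while-loop and both counting for-loops by a closed form
-- (lstrip to split off leading bangs, trailing characters force n = 1, a single
-- parity test for the negations); objective: simpler.

-- ===== PORT A =====
-- the while loop: count leading '!' characters (index where the scan stops)
def pvBangScan : List Char → Nat
  | [] => 0        -- Python raises IndexError here; excluded by Pre_
  | c :: rest => if c = '!' then pvBangScan rest + 1 else 0

def calculate_expression (expression : String) : Int :=
  let chars := expression.toList
  let nIndex := pvBangScan chars
  -- n = int(expression[n_index]); parse failure (ValueError) is excluded by Pre_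
  let n : Int := (PySem.Int.ofStr? (String.ofList ((chars.drop nIndex).take 1))).getD 0
  let leftBangCount := nIndex
  let rightBangCount := chars.length - nIndex - 1
  let n := List.foldl (fun _ _ => (1 : Int)) n (List.range rightBangCount)
  let n := List.foldl (fun n _ => 1 - n) n (List.range leftBangCount)
  n

-- ===== PORT B =====
def calculate_expression_alt (expression : String) : Int :=
  let chars := expression.toList
  let stripped := chars.dropWhile (fun c => c == '!')
  let left := chars.length - stripped.length
  let n0 : Int := (PySem.Int.ofStr? (String.ofList (stripped.take 1))).getD 0
  let n : Int := if stripped.length > 1 then 1 else n0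
  if left % 2 == 1 then 1 - n else n

-- ===== PRECONDITION & SPEC =====
-- Pre_ excludes exactly the inputs where Python A raises: strings consisting only
-- of '!' (IndexError, including the empty string) and strings whose first
-- non-'!' character is not a decimal digit (ValueError in int()).
def Pre_calculate_expression (expression : String) : Prop :=
  let stripped := expression.toList.dropWhile (fun c => c == '!')
  stripped ≠ [] ∧ stripped.headI.isDigit = true
instance (expression : String) : Decidable (Pre_calculate_expression expression) := by
  unfold Pre_calculate_expression; infer_instance

def pvWitness_calculate_expression : String := "!5!"

def Spec_calculate_expression (expression : String) (out : Int) : Prop := out = calculate_expression_alt expression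
instance (expression : String) (out : Int) : Decidable (Spec_calculate_expression expression out) := by unfold Spec_calculate_expression; infer_instance

-- ===== CLAIM (what is proved, stated in full; the proofs are below) =====
def Claim_equal_calculate_expression : Prop := ∀ (expression : String), Dom_calculate_expression expression → Pre_calculate_expression expression → Spec_calculate_expression expression (calculate_expression expression)

-- ===== LEMMAS AND PROOFS =====
theorem pvBangScan_eq_sub (cs : List Char) :
    pvBangScan cs = cs.length - (cs.dropWhile (fun c => c == '!')).length := by
  induction cs with
  | nil => simp [pvBangScan]
  | cons c rest ih =>
    by_cases h : c = '!'
    · have hle := List.length_dropWhile_le (p := fun c => c == '!') (l := rest)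
      simp [pvBangScan, List.dropWhile, h, ih]
      omega
    · have hc : (c == '!') = false := by simp [h]
      simp [pvBangScan, List.dropWhile, hc, h]

theorem pvBangScan_drop (cs : List Char) :
    cs.drop (pvBangScan cs) = cs.dropWhile (fun c => c == '!') := by
  induction cs with
  | nil => simp [pvBangScan]
  | cons c rest ih =>
    by_cases h : c = '!'
    · simp [pvBangScan, List.dropWhile_cons, h, ih]
    · have hc : (c == '!') = false := by simp [h]
      simp [pvBangScan, List.dropWhile_cons, hc, h]

theorem pvFoldOne (n : Int) (k : Nat) :
    List.foldl (fun _ _ => (1 : Int)) n (List.range k) = if k = 0 then n else 1 := by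
  cases k with
  | zero => simp
  | succ m => simp [List.range_succ]

theorem pvFoldNeg (n : Int) (k : Nat) :
    List.foldl (fun n _ => 1 - n) n (List.range k) = if k % 2 = 1 then 1 - n else n := by
  induction k generalizing n with
  | zero => simp
  | succ m ih =>
    rw [List.range_succ, List.foldl_append, ih]
    rcases Nat.even_or_odd m with ⟨t, ht⟩ | ⟨t, ht⟩ <;> subst ht <;>
      simp <;> omega

-- ===== VERDICT (by name: the statement is the Claim_ definition above) =====
theorem calculate_expression_spec : Claim_equal_calculate_expression := by
  intro expression _ hpre
  unfold Pre_calculate_expression at hpre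
  obtain ⟨hne, -⟩ := hpre
  have h1 : 0 < (expression.toList.dropWhile (fun c => c == '!')).length :=
    List.length_pos_iff.mpr hne
  have hle := List.length_dropWhile_le (p := fun c => c == '!') (l := expression.toList)
  unfold Spec_calculate_expression calculate_expression calculate_expression_alt
  simp only [pvBangScan_drop]
  simp only [pvBangScan_eq_sub]
  rw [pvFoldOne, pvFoldNeg]
  have hX : expression.toList.length -
      (expression.toList.length - (expression.toList.dropWhile (fun c => c == '!')).length) - 1
      = (expression.toList.dropWhile (fun c => c == '!')).length - 1 := by omega
  rw [hX]
  by_cases h2 : (expression.toList.dropWhile (fun c => c == '!')).length > 1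
  · have h3 : ¬((expression.toList.dropWhile (fun c => c == '!')).length - 1 = 0) := by omega
    simp [h2, h3]
  · have h3 : (expression.toList.dropWhile (fun c => c == '!')).length - 1 = 0 := by omega
    simp [h2, h3]
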